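-- pv_equiv track=rewrite | github.com/GJKarthik/sap-oss-v1 | docs/Archive/machine-readable/scripts/prepare_finsight_machine_readable.py | dedupe_names
-- ===== SOURCE A (Python) =====
-- from collections import Counter, defaultdict
--
-- def dedupe_names(items: list[str], sep: str = "_", close_suffix: str = "") -> list[str]:
--     seen: dict[str, int] = defaultdict(int)
--     out: list[str] = []
--     for item in items:
--         seen[item] += 1
--         if seen[item] == 1:
--             out.append(item)
--         else:
--             out.append(f"{item}{sep}{seen[item]}{close_suffix}")
--     return out
-- ===== SOURCE B (Python) =====
-- def dedupe_names(items: list[str], sep: str = "_", close_suffix: str = "") -> list[str]: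
--     # Group-by then scatter: collect the positions of each distinct item first,
--     # then fill a preallocated output, numbering each item by its rank in its group.
--     positions: dict[str, list[int]] = {}
--     for i, item in enumerate(items):
--         positions.setdefault(item, []).append(i)
--     out = [""] * len(items)
--     for item, idxs in positions.items():
--         for k, i in enumerate(idxs):
--             out[i] = item if k == 0 else f"{item}{sep}{k + 1}{close_suffix}"
--     return out
-- ===== Notes on version B (the rewrite author's own statement) =====
-- stated objective: alternative
-- what changed: Replaces A's single streaming pass with a running per-item counter by a group-by-then-scatter scheme: one pass collects each distinct item's positions, then a preallocated output is filled group by group, numbering each occurrence by its rank within its group.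
import Mathlib
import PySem

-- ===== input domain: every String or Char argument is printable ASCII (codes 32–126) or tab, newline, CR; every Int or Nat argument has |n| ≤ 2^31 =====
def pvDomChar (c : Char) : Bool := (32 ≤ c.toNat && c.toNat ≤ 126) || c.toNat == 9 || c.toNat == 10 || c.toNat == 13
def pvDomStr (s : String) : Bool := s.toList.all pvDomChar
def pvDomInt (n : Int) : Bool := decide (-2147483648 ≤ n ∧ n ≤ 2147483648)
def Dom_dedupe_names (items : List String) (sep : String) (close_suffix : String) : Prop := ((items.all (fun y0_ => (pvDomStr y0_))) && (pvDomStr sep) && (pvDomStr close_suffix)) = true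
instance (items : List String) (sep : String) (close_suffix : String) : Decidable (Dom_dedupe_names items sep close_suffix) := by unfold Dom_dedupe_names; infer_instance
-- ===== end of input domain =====

-- B replaces A's single running-count pass with a group-by-then-scatter scheme:
-- collect each distinct item's positions first, then fill a preallocated output,
-- numbering each occurrence by its rank inside its group (alternative decomposition, same cost class).

-- ===== PORT A =====
-- one loop iteration of A: bump seen[item], then emit the bare item or item+sep+count+close_suffix
def dnStep (sep close_suffix : String) (st : PySem.Dict String Int × List String) (item : String) :
    PySem.Dict String Int × List String :=
  let seen := st.1.modify item 0 (· + 1)            -- seen[item] += 1 (defaultdict(int))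
  if seen.getD item 0 = 1 then (seen, st.2 ++ [item])
  else (seen, st.2 ++ [item ++ sep ++ PySem.Int.toStr (seen.getD item 0) ++ close_suffix])

def dedupe_names (items : List String) (sep : String) (close_suffix : String) : List String :=
  (items.foldl (dnStep sep close_suffix) (PySem.Dict.empty, [])).2

-- ===== PORT B =====
def dedupe_names_alt (items : List String) (sep : String) (close_suffix : String) : List String :=
  -- positions: dict item -> list of its indices, built by one enumerate pass
  let positions : PySem.Dict String (List Int) :=
    (PySem.List.enumerate items 0).foldl
      (fun d p => d.modify p.2 [] (fun l => l ++ [p.1])) PySem.Dict.empty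
  -- out = [""] * len(items), then scatter per group (every stored index is in range,
  -- so Python's in-range assignment out[i] = v is exactly List.set)
  let out0 : List String := List.replicate items.length ""
  positions.items.foldl
    (fun out g =>
      (PySem.List.enumerate g.2 0).foldl
        (fun out q =>
          out.set q.2.toNat
            (if q.1 = 0 then g.1
             else g.1 ++ sep ++ PySem.Int.toStr (q.1 + 1) ++ close_suffix))
        out)
    out0

-- ===== PRECONDITION & SPEC =====
def Spec_dedupe_names (items : List String) (sep : String) (close_suffix : String) (out : List String) : Prop := out = dedupe_names_alt items sep close_suffix
instance (items : List String) (sep : String) (close_suffix : String) (out : List String) : Decidable (Spec_dedupe_names items sep close_suffix out) := by unfold Spec_dedupe_names; infer_instance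

-- ===== CLAIM (what is proved, stated in full; the proofs are below) =====
def Claim_equal_dedupe_names : Prop := ∀ (items : List String) (sep : String) (close_suffix : String), Dom_dedupe_names items sep close_suffix → Spec_dedupe_names items sep close_suffix (dedupe_names items sep close_suffix)

-- ===== LEMMAS AND PROOFS =====

-- the common reference value: entry j of the result, phrased over enumerate pairs
def dnRef (items : List String) (sep close_suffix : String) (p : Int × String) : String :=
  let n : Int := ((items.take p.1.toNat).count p.2 : Int) + 1
  if n = 1 then p.2 else p.2 ++ sep ++ PySem.Int.toStr n ++ close_suffix

-- ---- A-side: loop invariant — the dict holds exactly the counts of the processed prefix ----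
lemma dn_loop (sep close_suffix : String) :
    ∀ (rest pre : List String) (d : PySem.Dict String Int) (out : List String),
    (∀ x, d.getD x 0 = (pre.count x : Int)) →
    (rest.foldl (dnStep sep close_suffix) (d, out)).2
      = out ++ (PySem.List.enumerate rest (pre.length : Int)).map
          (fun p => dnRef (pre ++ rest) sep close_suffix p) := by
  intro rest
  induction rest with
  | nil => intro pre d out h; simp
  | cons x xs ih =>
    intro pre d out h
    have hd : (d.modify x 0 (· + 1)).getD x 0 = (pre.count x : Int) + 1 := by
      rw [PySem.Dict.getD_modify_self, h]
    have h' : ∀ y, (d.modify x 0 (· + 1)).getD y 0 = ((pre ++ [x]).count y : Int) := by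
      intro y
      rw [PySem.Dict.getD_modify, List.count_append]
      by_cases hy : y = x
      · subst hy; simp [h]
      · simp [hy, h y, Ne.symm hy]
    have ihx := ih (pre ++ [x]) (d.modify x 0 (· + 1))
    simp only [List.append_assoc, List.cons_append, List.nil_append, List.length_append,
      List.length_cons, List.length_nil] at ihx
    rw [PySem.List.enumerate_cons, List.map_cons, List.foldl_cons, dnStep]
    simp only [hd]
    have htake : ((pre ++ x :: xs).take ((pre.length : Int)).toNat) = pre := by
      simp [List.take_left']
    have hhead : dnRef (pre ++ x :: xs) sep close_suffix ((pre.length : Int), x)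
        = if (pre.count x : Int) + 1 = 1 then x
          else x ++ sep ++ PySem.Int.toStr ((pre.count x : Int) + 1) ++ close_suffix := by
      simp only [dnRef]
      rw [htake]
    rw [hhead]
    by_cases hc : (pre.count x : Int) + 1 = 1
    · simp only [if_pos hc]
      rw [ihx _ h']
      simp only [List.append_assoc, List.singleton_append]
      norm_num
    · simp only [if_neg hc]
      rw [ihx _ h']
      simp only [List.append_assoc, List.singleton_append]
      norm_num

-- ---- B-side helpers ----

-- indices of x in items (enumerate-based, generalized start)
def dnIdx (items : List String) (s : Int) (x : String) : List Int :=
  ((PySem.List.enumerate items s).filter (fun p => p.2 == x)).map (·.1)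

-- flattened write list of B's scatter phase
def dnWrites (sep close_suffix : String) (G : List (String × List Int)) : List (Nat × String) :=
  G.flatMap (fun g => (PySem.List.enumerate g.2 0).map
    (fun q => (q.2.toNat, if q.1 = 0 then g.1
                          else g.1 ++ sep ++ PySem.Int.toStr (q.1 + 1) ++ close_suffix)))

lemma dnIdx_cons (y : String) (xs : List String) (s : Int) (x : String) :
    dnIdx (y :: xs) s x = (if y = x then [s] else []) ++ dnIdx xs (s + 1) x := by
  by_cases h : y = x <;>
    simp [dnIdx, PySem.List.enumerate_cons, h]

-- forward: the k-th stored index of x is the position of the (k+1)-th occurrence of x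
lemma dnIdx_get : ∀ (items : List String) (s : Int) (x : String) (k : Nat),
    k < (dnIdx items s x).length →
    ∃ j : Nat, (dnIdx items s x)[k]? = some (s + (j : Int)) ∧
      j < items.length ∧ items[j]? = some x ∧ (items.take j).count x = k := by
  intro items
  induction items with
  | nil => intro s x k h; simp [dnIdx] at h
  | cons y xs ih =>
    intro s x k h
    rw [dnIdx_cons] at h ⊢
    by_cases hy : y = x
    · simp only [if_pos hy, List.singleton_append] at h ⊢
      cases k with
      | zero => exact ⟨0, by simp, by simp, by simpa using hy, by simp⟩
      | succ k =>
        obtain ⟨j, hg, hj, hx, hc⟩ := ih (s + 1) x k (by simpa using h)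
        refine ⟨j + 1, ?_, by simpa using Nat.succ_lt_succ hj, by simpa using hx, ?_⟩
        · rw [List.getElem?_cons_succ, hg]; congr 1; push_cast; ring
        · simp [List.take_succ_cons, hy, hc]
    · simp only [if_neg hy, List.nil_append] at h ⊢
      obtain ⟨j, hg, hj, hx, hc⟩ := ih (s + 1) x k h
      refine ⟨j + 1, ?_, by simpa using Nat.succ_lt_succ hj, by simpa using hx, ?_⟩
      · rw [hg]; congr 1; push_cast; ring
      · simp [List.take_succ_cons, hy, hc]

-- backward: position j of an occurrence of x is stored at rank (count of x before j)
lemma dnIdx_mem : ∀ (items : List String) (s : Int) (x : String) (j : Nat)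
    (hj : j < items.length), items[j] = x →
    (dnIdx items s x)[(items.take j).count x]? = some (s + (j : Int)) := by
  intro items
  induction items with
  | nil => intro s x j hj; simp at hj
  | cons y xs ih =>
    intro s x j hj hx
    rw [dnIdx_cons]
    cases j with
    | zero =>
      simp only [List.getElem_cons_zero] at hx
      subst hx
      simp
    | succ j =>
      simp only [List.getElem_cons_succ] at hx
      have ihx := ih (s + 1) x j (by simpa using Nat.lt_of_succ_lt_succ hj) hx
      by_cases hy : y = x
      · subst hy
        rw [if_pos rfl, List.singleton_append, List.take_succ_cons, List.count_cons_self,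
          List.getElem?_cons_succ, ihx]
        congr 1; push_cast; ring
      · rw [if_neg hy, List.nil_append, List.take_succ_cons]
        have hcnt : (y :: xs.take j).count x = (xs.take j).count x := by
          simp [hy]
        rw [hcnt, ihx]
        congr 1; push_cast; ring

-- nested scatter loop = flat fold of the write list
lemma dn_nested (sep close_suffix : String) (G : List (String × List Int)) (out0 : List String) :
    G.foldl (fun out g =>
      (PySem.List.enumerate g.2 0).foldl
        (fun out q => out.set q.2.toNat
          (if q.1 = 0 then g.1
           else g.1 ++ sep ++ PySem.Int.toStr (q.1 + 1) ++ close_suffix)) out) out0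
    = (dnWrites sep close_suffix G).foldl (fun out w => out.set w.1 w.2) out0 := by
  induction G generalizing out0 with
  | nil => simp [dnWrites]
  | cons g G ih =>
    simp only [List.foldl_cons, dnWrites, List.flatMap_cons, List.foldl_append, List.foldl_map]
    rw [ih]; rfl

lemma length_foldl_set (W : List (Nat × String)) (out0 : List String) :
    (W.foldl (fun out w => out.set w.1 w.2) out0).length = out0.length := by
  induction W generalizing out0 with
  | nil => rfl
  | cons w W ih => simp [List.foldl_cons, ih]

lemma getElem?_foldl_set (W : List (Nat × String)) (out0 : List String) (j : Nat)
    (hj : j < out0.length) :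
    (W.foldl (fun out w => out.set w.1 w.2) out0)[j]?
      = some (match W.reverse.find? (fun w => w.1 == j) with
              | some w => w.2
              | none => out0[j]) := by
  induction W generalizing out0 with
  | nil => simp [List.getElem?_eq_getElem hj]
  | cons w W ih =>
    rw [List.foldl_cons, ih (out0.set w.1 w.2) (by simpa using hj),
      List.reverse_cons, List.find?_append]
    cases hf : W.reverse.find? (fun w => w.1 == j) with
    | some u => simp
    | none =>
      by_cases hw : w.1 = j
      · simp [hw]
      · simp [hw]

-- final value at j when every write to j carries v and at least one write to j exists
lemma getElem?_foldl_set_of (W : List (Nat × String)) (out0 : List String) (j : Nat)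
    (hj : j < out0.length) (v : String)
    (hall : ∀ w ∈ W, w.1 = j → w.2 = v) (hex : ∃ w ∈ W, w.1 = j) :
    (W.foldl (fun out w => out.set w.1 w.2) out0)[j]? = some v := by
  rw [getElem?_foldl_set W out0 j hj]
  obtain ⟨w0, hw0, hw0j⟩ := hex
  cases hf : W.reverse.find? (fun w => w.1 == j) with
  | some u =>
    have hu : u ∈ W.reverse := List.mem_of_find?_eq_some hf
    have huj : u.1 = j := by simpa using List.find?_some hf
    simp [hall u (List.mem_reverse.mp hu) huj]
  | none =>
    exfalso
    have := List.find?_eq_none.mp hf w0 (List.mem_reverse.mpr hw0)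
    simp [hw0j] at this

-- characterization of B's positions dict
lemma dn_positions_getD (items : List String) (x : String) :
    ((PySem.List.enumerate items 0).foldl
        (fun d p => d.modify p.2 [] (fun l => l ++ [p.1])) PySem.Dict.empty).getD x []
      = dnIdx items 0 x := by
  have hmap : (PySem.List.enumerate items 0).foldl
        (fun d p => d.modify p.2 [] (fun l => l ++ [p.1])) PySem.Dict.empty
      = ((PySem.List.enumerate items 0).map Prod.swap).foldl
        (fun d p => d.modify p.1 [] (fun l => l ++ [p.2])) PySem.Dict.empty := by
    rw [List.foldl_map]; rfl
  rw [hmap, PySem.Dict.getD_foldl_modify_append]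
  simp only [PySem.Dict.getD_empty, List.nil_append, dnIdx]
  rw [List.filter_map]
  simp [Function.comp_def, Prod.swap]

-- B computes the reference list
lemma B_eq_ref (items : List String) (sep close_suffix : String) :
    dedupe_names_alt items sep close_suffix
      = (PySem.List.enumerate items 0).map (dnRef items sep close_suffix) := by
  unfold dedupe_names_alt
  simp only []
  set positions : PySem.Dict String (List Int) :=
    (PySem.List.enumerate items 0).foldl
      (fun d p => d.modify p.2 [] (fun l => l ++ [p.1])) PySem.Dict.empty with hpos
  have hnodup : positions.keys.Nodup := by
    rw [hpos]
    exact PySem.Dict.nodup_keys_foldl_modify_key _ _ _ _ _ (by simp)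
  have hkeys : ∀ y, y ∈ positions.keys ↔ y ∈ items := by
    intro y
    rw [hpos, PySem.Dict.keys_foldl_modify_key]
    have : PySem.Set.update (PySem.Dict.empty : PySem.Dict String (List Int)).keys
        ((PySem.List.enumerate items 0).map (·.2)) = PySem.Set.ofList items := by
      simp [PySem.List.map_snd_enumerate, PySem.Set.update, PySem.Set.ofList]
    rw [this, PySem.Set.mem_ofList]
  have hitems : positions.items = positions.keys.map (fun k => (k, dnIdx items 0 k)) := by
    rw [PySem.Dict.items_eq_map_keys positions hnodup []]
    exact List.map_congr_left (fun k _ => by rw [hpos, dn_positions_getD])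
  rw [dn_nested, hitems]
  apply List.ext_getElem
  · rw [length_foldl_set]; simp [PySem.List.length_enumerate]
  intro j hjl hjr
  have hj : j < items.length := by
    simpa [PySem.List.length_enumerate] using hjr
  have hj0 : j < (List.replicate items.length "").length := by simpa using hj
  -- right side at j
  have hr : ((PySem.List.enumerate items 0).map (dnRef items sep close_suffix))[j]
      = dnRef items sep close_suffix ((0 : Int) + (j : Int), items[j]) := by
    rw [List.getElem_map, PySem.List.getElem_enumerate]
  rw [hr]
  -- left side at j via the write-list lemma
  have key : ∀ w ∈ dnWrites sep close_suffix (positions.keys.map (fun k => (k, dnIdx items 0 k))),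
      w.1 = j → w.2 = dnRef items sep close_suffix ((0 : Int) + (j : Int), items[j]) := by
    intro w hw hwj
    simp only [dnWrites, List.mem_flatMap, List.mem_map] at hw
    obtain ⟨g, ⟨x, hxk, hgx⟩, q, hq, hwq⟩ := hw
    subst hgx
    rw [PySem.List.mem_enumerate_iff] at hq
    obtain ⟨k, hk, hqk⟩ := hq
    subst hqk
    obtain ⟨j', hg0', hj', hx0', hc'⟩ := dnIdx_get items 0 x k hk
    obtain ⟨hklt', hg'⟩ := List.getElem?_eq_some_iff.mp hg0'
    have hx' : items[j']'hj' = x := by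
      have := List.getElem?_eq_some_iff.mp hx0'
      exact this.2
    simp only at hg' hwq
    rw [hg'] at hwq
    have hjj : j' = j := by
      have : ((0 : Int) + (j' : Int)).toNat = j' := by simp
      rw [← hwq] at hwj; simpa [this] using hwj
    subst hjj
    have hxv : items[j'] = x := hx'
    rw [← hwq]
    simp only [dnRef]
    have htn : (((0:Int) + (j' : Int)).toNat) = j' := by simp
    rw [htn, hxv, hc']
    by_cases hk0 : k = 0
    · subst hk0; norm_num
    · have hki : ((0 : Int) + (k : Int)) ≠ 0 := by
        simpa using (by exact_mod_cast hk0 : ((k : Int)) ≠ 0)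
      have hci : ((k : Int)) + 1 ≠ 1 := by
        intro h; exact hk0 (by exact_mod_cast (by linarith : ((k : Int)) = 0))
      simp only [if_neg hki, if_neg hci]
      norm_num
  have hex : ∃ w ∈ dnWrites sep close_suffix (positions.keys.map (fun k => (k, dnIdx items 0 k))),
      w.1 = j := by
    set x := items[j] with hx
    have hmemk : x ∈ positions.keys := (hkeys x).mpr (List.getElem_mem hj)
    have hsome := dnIdx_mem items 0 x j hj rfl
    have hklt : (items.take j).count x < (dnIdx items 0 x).length :=
      List.getElem?_eq_some_iff.mp hsome |>.1
    have hgv : (dnIdx items 0 x)[(items.take j).count x]'hklt = 0 + (j : Int) := by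
      have := List.getElem?_eq_some_iff.mp hsome |>.2
      simpa using this
    refine ⟨(((0:Int) + (j:Int)).toNat,
      (if ((0:Int) + ((items.take j).count x : Int)) = 0 then x
       else x ++ sep ++ PySem.Int.toStr (((0:Int) + ((items.take j).count x : Int)) + 1) ++ close_suffix)), ?_, by push_cast; simp⟩
    simp only [dnWrites, List.mem_flatMap, List.mem_map]
    refine ⟨(x, dnIdx items 0 x), ⟨x, hmemk, rfl⟩, ⟨((0:Int) + ((items.take j).count x : Int), (0:Int) + (j:Int)), ?_, rfl⟩⟩
    rw [PySem.List.mem_enumerate_iff]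
    exact ⟨(items.take j).count x, hklt, by rw [hgv]⟩
  have hfin := getElem?_foldl_set_of _ _ j hj0 _ key hex
  exact (List.getElem?_eq_some_iff.mp hfin).2

-- ===== VERDICT (by name: the statement is the Claim_ definition above) =====
theorem dedupe_names_spec : Claim_equal_dedupe_names := by
  intro items sep close_suffix _
  unfold Spec_dedupe_names
  rw [B_eq_ref]
  unfold dedupe_names
  have := dn_loop sep close_suffix items [] PySem.Dict.empty [] (by simp)
  simpa using this
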